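-- pv_equiv track=rewrite | github.com/wyattmchalffey/Botlatro | src/balatro_ai/bots/basic_strategy_bot.py | _order_with_copy_before_target
-- ===== SOURCE A (Python) =====
-- def _order_with_copy_before_target(
--     order: tuple[int, ...],
--     copy_index: int,
--     target_index: int,
-- ) -> tuple[int, ...]:
--     without_copy = [index for index in order if index != copy_index]
--     try:
--         target_position = without_copy.index(target_index)
--     except ValueError:
--         return tuple(order)
--     without_copy.insert(target_position, copy_index)
--     return tuple(without_copy)
-- ===== SOURCE B (Python) =====
-- def _order_with_copy_before_target(
--     order: tuple[int, ...],
--     copy_index: int,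
--     target_index: int,
-- ) -> tuple[int, ...]:
--     result = []
--     found = False
--     for index in order:
--         if index == copy_index:
--             continue
--         if not found and index == target_index:
--             result.append(copy_index)
--             found = True
--         result.append(index)
--     return tuple(result) if found else tuple(order)
-- ===== Notes on version B (the rewrite author's own statement) =====
-- stated objective: alternative
-- what changed: Replaces the three-pass filter + .index + insert pipeline with one fused traversal that builds the result while tracking a found flag.
import Mathlib
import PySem

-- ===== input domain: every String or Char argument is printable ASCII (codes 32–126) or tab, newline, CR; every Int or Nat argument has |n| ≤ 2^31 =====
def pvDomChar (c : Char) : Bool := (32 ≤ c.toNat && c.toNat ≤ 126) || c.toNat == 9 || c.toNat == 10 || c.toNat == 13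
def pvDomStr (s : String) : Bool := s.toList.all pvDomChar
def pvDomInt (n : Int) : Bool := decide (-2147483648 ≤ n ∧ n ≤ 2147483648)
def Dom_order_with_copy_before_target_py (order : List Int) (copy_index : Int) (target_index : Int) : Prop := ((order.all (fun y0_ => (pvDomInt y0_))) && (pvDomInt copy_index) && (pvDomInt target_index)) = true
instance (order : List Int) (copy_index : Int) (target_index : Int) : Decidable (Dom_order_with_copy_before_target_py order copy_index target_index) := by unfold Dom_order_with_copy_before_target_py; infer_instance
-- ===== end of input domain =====

-- B fuses A's filter + .index + insert three-pass pipeline into one traversal with a found flag (alternative decomposition, same cost).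

-- ===== PORT A =====
def order_with_copy_before_target_py (order : List Int) (copy_index : Int) (target_index : Int) : List Int :=
  let without_copy := order.filter (fun index => index != copy_index)
  match PySem.List.index? without_copy target_index with
  | none => order
  | some target_position => PySem.List.insert without_copy (target_position : Int) copy_index

-- ===== PORT B =====
-- the loop of Source B: state = (result, found), appended exactly as the Python appends
def owcbtAltGo (copy_index target_index : Int) : List Int → List Int → Bool → (List Int × Bool)
  | [], result, found => (result, found)
  | index :: rest, result, found =>
    if index == copy_index then owcbtAltGo copy_index target_index rest result found
    else if !found && index == target_index then
      owcbtAltGo copy_index target_index rest (result ++ [copy_index, index]) true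
    else owcbtAltGo copy_index target_index rest (result ++ [index]) found

def order_with_copy_before_target_py_alt (order : List Int) (copy_index : Int) (target_index : Int) : List Int :=
  let st := owcbtAltGo copy_index target_index order [] false
  if st.2 then st.1 else order

-- ===== PRECONDITION & SPEC =====
def Spec_order_with_copy_before_target_py (order : List Int) (copy_index : Int) (target_index : Int) (out : List Int) : Prop := out = order_with_copy_before_target_py_alt order copy_index target_index
instance (order : List Int) (copy_index : Int) (target_index : Int) (out : List Int) : Decidable (Spec_order_with_copy_before_target_py order copy_index target_index out) := by unfold Spec_order_with_copy_before_target_py; infer_instance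

-- ===== CLAIM (what is proved, stated in full; the proofs are below) =====
def Claim_equal_order_with_copy_before_target_py : Prop := ∀ (order : List Int) (copy_index : Int) (target_index : Int), Dom_order_with_copy_before_target_py order copy_index target_index → Spec_order_with_copy_before_target_py order copy_index target_index (order_with_copy_before_target_py order copy_index target_index)

-- ===== LEMMAS AND PROOFS =====

-- once found, the loop just appends the remaining non-copy elements
lemma owcbtAltGo_true (c t : Int) (xs : List Int) : ∀ (acc : List Int),
    owcbtAltGo c t xs acc true = (acc ++ xs.filter (fun i => i != c), true) := by
  induction xs with
  | nil => intro acc; simp [owcbtAltGo]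
  | cons x xs ih =>
    intro acc
    by_cases hx : x = c
    · simp [owcbtAltGo, hx, ih]
    · simp [owcbtAltGo, hx, ih, bne_iff_ne]

-- before the target is found, the loop's outcome is A's filter/index/insert result
lemma owcbtAltGo_false (c t : Int) (xs : List Int) : ∀ (acc : List Int),
    owcbtAltGo c t xs acc false =
      (match PySem.List.index? (xs.filter (fun i => i != c)) t with
       | none => (acc ++ xs.filter (fun i => i != c), false)
       | some p => (acc ++ PySem.List.insert (xs.filter (fun i => i != c)) (p : Int) c, true)) := by
  induction xs with
  | nil => intro acc; simp [owcbtAltGo, PySem.List.index?]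
  | cons x xs ih =>
    intro acc
    by_cases hx : x = c
    · simp [owcbtAltGo, hx, ih]
    · have hf : (x :: xs).filter (fun i => i != c) = x :: xs.filter (fun i => i != c) := by
        simp [bne_iff_ne, hx]
      rw [hf]
      by_cases ht : x = t
      · subst ht
        rw [PySem.List.index?_cons_self]
        simp only [owcbtAltGo, beq_iff_eq, hx, if_false, Bool.not_false, Bool.true_and,
          BEq.rfl, if_true]
        rw [owcbtAltGo_true]
        rw [PySem.List.insert_natCast _ 0 _ (Nat.zero_le _)]
        simp
      · rw [PySem.List.index?_cons_of_ne _ ht]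
        simp only [owcbtAltGo, beq_iff_eq, hx, if_false, ht, Bool.not_false, Bool.true_and]
        rw [ih]
        cases hidx : PySem.List.index? (xs.filter (fun i => i != c)) t with
        | none => simp
        | some p =>
          have hp : p ≤ (xs.filter (fun i => i != c)).length := by
            rcases Iff.mp (PySem.List.index?_eq_some_iff _ _ _) hidx with ⟨pre, suf, hxs, hlen, _⟩
            simp [hxs, ← hlen]
          simp only [Option.map_some]
          rw [PySem.List.insert_natCast _ p _ hp]
          rw [show ((↑(p + 1) : Int)) = ((p + 1 : Nat) : Int) by push_cast; ring]
          rw [PySem.List.insert_natCast _ (p + 1) _ (by simpa using Nat.succ_le_succ hp)]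
          simp [List.take_succ_cons, List.drop_succ_cons]

-- ===== VERDICT (by name: the statement is the Claim_ definition above) =====
theorem order_with_copy_before_target_py_spec : Claim_equal_order_with_copy_before_target_py := by
  intro order c t _
  unfold Spec_order_with_copy_before_target_py
  unfold order_with_copy_before_target_py order_with_copy_before_target_py_alt
  rw [owcbtAltGo_false]
  cases h : PySem.List.index? (order.filter (fun i => i != c)) t with
  | none => simp only [h]; simp
  | some p => simp only [h]; simp
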